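-- pv_equiv track=rewrite | github.com/NishanthRajkumar/Python-Data-Structure | list_programs/14_circular_check.py | chk_circular
-- ===== SOURCE A (Python) =====
-- def chk_circular(list1: list, list2: list):
--     """
--         Description:
--             Checks if 2 lists are circularly identical
--
--         Parameter:
--             list1, list2: The 2 lists to check if circularly identical
--
--         Return:
--             True if circularly identical, else False
--     """
--     if len(list1) != len(list2):
--         return False
--     double_list = list1 + list1
--     for i in range(len(list1)):
--         if list2 == double_list[i: i + len(list2)]:
--             return True
--     return False
-- ===== SOURCE B (Python) =====
-- def chk_circular(list1: list, list2: list):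
--     """Alternative: instead of doubling list1 and comparing equal-length slices,
--     rotate list2 one element at a time and compare whole lists against list1."""
--     if len(list1) != len(list2):
--         return False
--     rot = list2
--     for _ in range(len(list1)):
--         if rot == list1:
--             return True
--         rot = rot[1:] + rot[:1]
--     return False
-- ===== Notes on version B (the rewrite author's own statement) =====
-- stated objective: alternative
-- what changed: B drops A's doubled list and per-index window slicing: it maintains list2 as a rotating accumulator (rot = rot[1:] + rot[:1] each step) and compares the whole rotated list against list1, so no concatenated double list and no slice indexing exist in B.
import Mathlib
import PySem

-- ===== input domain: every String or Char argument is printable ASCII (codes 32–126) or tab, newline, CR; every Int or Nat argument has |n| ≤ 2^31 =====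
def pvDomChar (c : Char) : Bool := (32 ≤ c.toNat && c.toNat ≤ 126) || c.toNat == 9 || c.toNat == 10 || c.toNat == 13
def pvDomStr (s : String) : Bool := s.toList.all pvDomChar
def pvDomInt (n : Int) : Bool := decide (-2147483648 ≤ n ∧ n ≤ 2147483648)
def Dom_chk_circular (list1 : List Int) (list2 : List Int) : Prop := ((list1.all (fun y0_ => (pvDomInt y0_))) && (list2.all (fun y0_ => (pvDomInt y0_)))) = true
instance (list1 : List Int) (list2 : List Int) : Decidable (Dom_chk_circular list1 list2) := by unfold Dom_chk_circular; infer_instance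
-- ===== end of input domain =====

-- B replaces A's doubled list and per-index slicing by stepwise rotation of list2
-- compared against list1 (objective: alternative decomposition, same asymptotic cost).

-- ===== PORT A =====
-- A: if lengths differ return False; double list1; for i in range(len(list1)):
--    if list2 == double_list[i : i + len(list2)]: return True; return False
def chk_circular (list1 : List Int) (list2 : List Int) : Bool :=
  if list1.length ≠ list2.length then false
  else
    let double_list := list1 ++ list1
    (PySem.List.pyRange 0 (list1.length : Int) 1).any
      (fun i => list2 == PySem.List.slice double_list (some i) (some (i + (list2.length : Int))))

-- ===== PORT B =====
-- B's loop: rot starts as list2; each step compares rot with list1, then rot = rot[1:] + rot[:1].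
def chkRotLoop (list1 : List Int) : Nat → List Int → Bool
  | 0, _ => false
  | k + 1, rot =>
    if rot == list1 then true
    else chkRotLoop list1 k (PySem.List.slice rot (some 1) none ++ PySem.List.slice rot none (some 1))

def chk_circular_alt (list1 : List Int) (list2 : List Int) : Bool :=
  if list1.length ≠ list2.length then false
  else chkRotLoop list1 list1.length list2

-- ===== PRECONDITION & SPEC =====
def Spec_chk_circular (list1 : List Int) (list2 : List Int) (out : Bool) : Prop := out = chk_circular_alt list1 list2
instance (list1 : List Int) (list2 : List Int) (out : Bool) : Decidable (Spec_chk_circular list1 list2 out) := by unfold Spec_chk_circular; infer_instance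

-- ===== CLAIM (what is proved, stated in full; the proofs are below) =====
def Claim_equal_chk_circular : Prop := ∀ (list1 : List Int) (list2 : List Int), Dom_chk_circular list1 list2 → Spec_chk_circular list1 list2 (chk_circular list1 list2)

-- ===== LEMMAS AND PROOFS =====

-- one Python rotation step rot[1:] + rot[:1] is List.rotate by 1
lemma rotStep_eq (rot : List Int) :
    PySem.List.slice rot (some 1) none ++ PySem.List.slice rot none (some 1) = rot.rotate 1 := by
  rw [PySem.List.slice_from_one]
  have h1 : PySem.List.slice rot none (some ((1 : Nat) : Int)) = rot.take 1 :=
    PySem.List.slice_to_natCast rot 1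
  rw [show ((1 : Nat) : Int) = (1 : Int) by norm_num] at h1
  rw [h1]
  cases rot with
  | nil => simp
  | cons a t =>
    have hr : (a :: t).rotate 1 = t ++ [a] := by
      rw [show (1 : Nat) = 0 + 1 from rfl, List.rotate_cons_succ, List.rotate_zero]
    simp [hr]

-- characterisation of B's loop
lemma chkRotLoop_iff (list1 : List Int) (k : Nat) (rot : List Int) :
    chkRotLoop list1 k rot = true ↔ ∃ j < k, rot.rotate j = list1 := by
  induction k generalizing rot with
  | zero => simp [chkRotLoop]
  | succ k ih =>
    rw [chkRotLoop]
    by_cases h : rot = list1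
    · simp only [h, beq_self_eq_true, if_true, true_iff]
      exact ⟨0, Nat.succ_pos k, by simp⟩
    · rw [if_neg (by simpa using h), rotStep_eq, ih]
      constructor
      · rintro ⟨j, hj, hrot⟩
        refine ⟨j + 1, by omega, ?_⟩
        rw [Nat.add_comm, ← List.rotate_rotate]
        exact hrot
      · rintro ⟨j, hj, hrot⟩
        cases j with
        | zero => exact absurd (by simpa using hrot) h
        | succ j =>
          refine ⟨j, by omega, ?_⟩
          rw [List.rotate_rotate, Nat.add_comm]
          exact hrot
-- the slice A takes from the doubled list is a rotation of list1
lemma slice_double_eq_rotate (l1 : List Int) (j : Nat) (hj : j < l1.length) :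
    PySem.List.slice (l1 ++ l1) (some (j : Int)) (some ((j : Int) + (l1.length : Int))) = l1.rotate j := by
  rw [PySem.List.slice_natCast_add, List.rotate_eq_drop_append_take hj.le,
      List.drop_append_of_le_length hj.le]
  have hlen : l1.length = (l1.drop j).length + j := by
    have := List.length_drop (l := l1) (i := j); omega
  rw [hlen, List.take_append, List.take_of_length_le (by omega)]
  have hjj : (l1.drop j).length + j - (l1.drop j).length = j := by omega
  rw [hjj]

-- characterisation of A's loop (lengths already equal)
lemma chkA_iff (l1 l2 : List Int) (hlen : l1.length = l2.length) :
    chk_circular l1 l2 = true ↔ ∃ j < l1.length, l2 = l1.rotate j := by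
  rw [chk_circular, if_neg (by simpa using hlen)]
  simp only [PySem.List.pyRange_zero_natCast, List.any_map, List.any_eq_true, List.mem_range,
    Function.comp, beq_iff_eq]
  constructor
  · rintro ⟨j, hj, heq⟩
    exact ⟨j, hj, by rwa [← hlen, slice_double_eq_rotate l1 j hj] at heq⟩
  · rintro ⟨j, hj, heq⟩
    exact ⟨j, hj, by rwa [← hlen, slice_double_eq_rotate l1 j hj]⟩

-- equal-length lists: a rotation of l1 equals l2 iff a rotation of l2 equals l1
lemma rot_exists_symm (l1 l2 : List Int) (hlen : l1.length = l2.length) :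
    (∃ j < l1.length, l2 = l1.rotate j) ↔ ∃ j < l1.length, l2.rotate j = l1 := by
  constructor
  · rintro ⟨j, hj, rfl⟩
    have hr : l1.rotate j ~r l1 := List.IsRotated.forall l1 j
    obtain ⟨k, hk, hkeq⟩ := List.isRotated_iff_mod.mp hr
    rcases Nat.lt_or_ge k ((l1.rotate j).length) with hlt | hge
    · exact ⟨k, by simpa using hlt, hkeq⟩
    · have hkl : k = (l1.rotate j).length := le_antisymm hk hge
      refine ⟨0, by omega, ?_⟩
      rw [List.rotate_zero]
      rw [hkl, List.rotate_length] at hkeq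
      exact hkeq
  · rintro ⟨j, hj, hrot⟩
    have hr : l1 ~r l2 := by
      have h := List.IsRotated.forall l2 j
      rw [hrot] at h
      exact h
    obtain ⟨k, hk, hkeq⟩ := List.isRotated_iff_mod.mp hr
    rcases Nat.lt_or_ge k l1.length with hlt | hge
    · exact ⟨k, hlt, hkeq.symm⟩
    · have hkl : k = l1.length := le_antisymm hk hge
      refine ⟨0, by omega, ?_⟩
      rw [hkl, List.rotate_length] at hkeq
      simp [hkeq]

-- ===== VERDICT (by name: the statement is the Claim_ definition above) =====
theorem chk_circular_spec : Claim_equal_chk_circular := by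
  intro l1 l2 _dom
  unfold Spec_chk_circular
  by_cases hlen : l1.length = l2.length
  · rw [Bool.eq_iff_iff, chkA_iff l1 l2 hlen, chk_circular_alt, if_neg (by simpa using hlen),
      chkRotLoop_iff, rot_exists_symm l1 l2 hlen]
  · rw [chk_circular, chk_circular_alt, if_pos (by simpa using hlen), if_pos (by simpa using hlen)]
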